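-- pv_equiv track=rewrite | github.com/NX-Whamza/noc-configmaker | vm_deployment/ftth_renderer.py | _strip_named_sections
-- ===== SOURCE A (Python) =====
-- def _strip_named_sections(config: str, section_headers: list[str]) -> str:
--     """Remove full RouterOS sections by header name."""
--     lines = config.splitlines()
--     remove_headers = {h.strip() for h in section_headers}
--     out: list[str] = []
--     i = 0
--     total = len(lines)
--     while i < total:
--         current = lines[i].strip()
--         if current in remove_headers:
--             i += 1
--             # Skip until next section header.
--             while i < total and not lines[i].startswith("/"):
--                 i += 1
--             continue
--         out.append(lines[i])
--         i += 1
--     return "\n".join(out).strip() + "\n"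
-- ===== SOURCE B (Python) =====
-- def _strip_named_sections(config: str, section_headers: list[str]) -> str:
--     """Remove full RouterOS sections by header name."""
--     remove_headers = {h.strip() for h in section_headers}
--     out: list[str] = []
--     skipping = False
--     for line in config.splitlines():
--         if line.startswith("/"):
--             skipping = False
--         if line.strip() in remove_headers:
--             skipping = True
--             continue
--         if not skipping:
--             out.append(line)
--     return "\n".join(out).strip() + "\n"
-- ===== Notes on version B (the rewrite author's own statement) =====
-- stated objective: simpler
-- what changed: Replaces the index-driven while loop with a nested skip-until-'/' inner loop by a single forward pass over the lines carrying one boolean 'skipping' flag.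
import Mathlib
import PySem

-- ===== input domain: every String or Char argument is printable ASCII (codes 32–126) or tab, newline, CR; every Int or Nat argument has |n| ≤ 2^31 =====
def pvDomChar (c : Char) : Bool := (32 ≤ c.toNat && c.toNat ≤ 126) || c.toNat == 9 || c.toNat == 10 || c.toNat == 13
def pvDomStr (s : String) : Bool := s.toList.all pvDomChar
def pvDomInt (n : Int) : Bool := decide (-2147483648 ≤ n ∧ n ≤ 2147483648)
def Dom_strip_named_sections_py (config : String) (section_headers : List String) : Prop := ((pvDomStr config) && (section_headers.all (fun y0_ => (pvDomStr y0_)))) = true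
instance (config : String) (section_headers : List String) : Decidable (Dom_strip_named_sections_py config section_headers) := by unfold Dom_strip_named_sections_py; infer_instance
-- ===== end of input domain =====

-- B replaces A's index-driven while loop with its nested skip-until-'/' scan by one
-- forward pass over the lines carrying a boolean `skipping` flag (objective: simpler).

-- ===== PORT A =====
-- inner loop: 'while i < total and not lines[i].startswith("/"): i += 1'
def skipIdxA (lines : List String) (total : Nat) (i : Nat) : Nat :=
  if _h : i < total ∧ ¬ (PySem.Str.startswith (lines.getD i "") "/" = true) then
    skipIdxA lines total (i + 1)
  else i
termination_by total - i

-- cited by loopA's decreasing_by: the inner loop never moves i backwards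
theorem skipIdxA_ge (lines : List String) (total i : Nat) : i ≤ skipIdxA lines total i := by
  rw [skipIdxA]
  split
  · have := skipIdxA_ge lines total (i + 1); omega
  · omega
termination_by total - i

-- outer loop: 'while i < total: …'
def loopA (lines : List String) (total : Nat) (remove : PySem.Set String) (i : Nat)
    (out : List String) : List String :=
  if _h : i < total then
    if PySem.Set.contains remove (PySem.Str.strip (lines.getD i "")) then
      loopA lines total remove (skipIdxA lines total (i + 1)) out
    else
      loopA lines total remove (i + 1) (out ++ [lines.getD i ""])
  else out
termination_by total - i
decreasing_by
  · have := skipIdxA_ge lines total (i + 1); omega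
  · omega

def strip_named_sections_py (config : String) (section_headers : List String) : String :=
  let lines := PySem.Str.splitlines config
  let remove : PySem.Set String := PySem.Set.ofList (section_headers.map PySem.Str.strip)
  PySem.Str.strip (PySem.Str.join "\n" (loopA lines lines.length remove 0 [])) ++ "\n"

-- ===== PORT B =====
-- one iteration of B's for-loop; state = (skipping, out)
def stepB (remove : PySem.Set String) (st : Bool × List String) (line : String) :
    Bool × List String :=
  let skipping := if PySem.Str.startswith line "/" then false else st.1
  if PySem.Set.contains remove (PySem.Str.strip line) then (true, st.2)
  else if skipping then (skipping, st.2)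
  else (skipping, st.2 ++ [line])

def strip_named_sections_py_alt (config : String) (section_headers : List String) : String :=
  let remove : PySem.Set String := PySem.Set.ofList (section_headers.map PySem.Str.strip)
  let res := (PySem.Str.splitlines config).foldl (stepB remove) (false, [])
  PySem.Str.strip (PySem.Str.join "\n" res.2) ++ "\n"

-- ===== PRECONDITION & SPEC =====
def Spec_strip_named_sections_py (config : String) (section_headers : List String) (out : String) : Prop := out = strip_named_sections_py_alt config section_headers
instance (config : String) (section_headers : List String) (out : String) : Decidable (Spec_strip_named_sections_py config section_headers out) := by unfold Spec_strip_named_sections_py; infer_instance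

-- ===== CLAIM (what is proved, stated in full; the proofs are below) =====
def Claim_equal_strip_named_sections_py : Prop := ∀ (config : String) (section_headers : List String), Dom_strip_named_sections_py config section_headers → Spec_strip_named_sections_py config section_headers (strip_named_sections_py config section_headers)

-- ===== LEMMAS AND PROOFS =====

theorem stepB_mem (remove : PySem.Set String) (line : String) (sk : Bool) (out : List String)
    (h : PySem.Str.strip line ∈ remove) : stepB remove (sk, out) line = (true, out) := by
  simp only [stepB]
  rw [if_pos ((PySem.Set.contains_iff _ _).mpr h)]

theorem stepB_false (remove : PySem.Set String) (line : String) (out : List String)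
    (h : ¬ PySem.Str.strip line ∈ remove) :
    stepB remove (false, out) line = (false, out ++ [line]) := by
  simp only [stepB]
  rw [if_neg (fun hx => h ((PySem.Set.contains_iff _ _).mp hx))]
  simp

theorem stepB_true_start (remove : PySem.Set String) (line : String) (out : List String)
    (h : ¬ PySem.Str.strip line ∈ remove) (hs : PySem.Str.startswith line "/" = true) :
    stepB remove (true, out) line = (false, out ++ [line]) := by
  simp only [stepB]
  rw [if_neg (fun hx => h ((PySem.Set.contains_iff _ _).mp hx))]
  simp at hs
  simp [hs]

theorem stepB_true_nostart (remove : PySem.Set String) (line : String) (out : List String)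
    (hs : ¬ PySem.Str.startswith line "/" = true) :
    stepB remove (true, out) line = (true, out) := by
  simp only [stepB]
  simp at hs
  by_cases hc : PySem.Set.contains remove (PySem.Str.strip line) = true
  · rw [if_pos hc]
  · rw [if_neg hc]
    simp [hs]

-- A's outer loop (from index i, non-skipping / just-entered-skipping state) equals
-- B's fold over the remaining lines with skipping = false / true.
theorem main_inv (remove : PySem.Set String) (n : Nat) :
    ∀ (lines : List String) (i : Nat) (out : List String), lines.length - i ≤ n →
      (loopA lines lines.length remove i out
          = ((lines.drop i).foldl (stepB remove) (false, out)).2)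
      ∧ (loopA lines lines.length remove (skipIdxA lines lines.length i) out
          = ((lines.drop i).foldl (stepB remove) (true, out)).2) := by
  induction n with
  | zero =>
    intro lines i out hle
    have hge : lines.length ≤ i := by omega
    have hdrop : lines.drop i = [] := List.drop_eq_nil_of_le hge
    have hskip : skipIdxA lines lines.length i = i := by
      rw [skipIdxA]; rw [dif_neg (by omega)]
    constructor
    · rw [loopA]; rw [dif_neg (by omega)]; rw [hdrop]; rfl
    · rw [hskip, loopA]; rw [dif_neg (by omega)]; rw [hdrop]; rfl
  | succ n ih =>
    intro lines i out hle
    by_cases hi : i < lines.length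
    · have hdrop : lines.drop i = lines.getD i "" :: lines.drop (i + 1) := by
        rw [List.drop_eq_getElem_cons hi, List.getD_eq_getElem lines "" hi]
      have hle' : lines.length - (i + 1) ≤ n := by omega
      by_cases hmem : PySem.Str.strip (lines.getD i "") ∈ remove
      · -- the line is a removed header in both states
        have hc : PySem.Set.contains remove (PySem.Str.strip (lines.getD i "")) = true :=
          (PySem.Set.contains_iff _ _).mpr hmem
        have hA : loopA lines lines.length remove i out
            = loopA lines lines.length remove (skipIdxA lines lines.length (i + 1)) out := by
          rw [loopA]; rw [dif_pos hi, if_pos hc]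
        constructor
        · rw [hA, hdrop, List.foldl_cons, stepB_mem remove _ false out hmem]
          exact (ih lines (i + 1) out hle').2
        · by_cases hsw : PySem.Str.startswith (lines.getD i "") "/" = true
          · have hskip : skipIdxA lines lines.length i = i := by
              rw [skipIdxA]; rw [dif_neg (fun h => h.2 hsw)]
            rw [hskip, hA, hdrop, List.foldl_cons, stepB_mem remove _ true out hmem]
            exact (ih lines (i + 1) out hle').2
          · have hskip : skipIdxA lines lines.length i = skipIdxA lines lines.length (i + 1) := by
              conv_lhs => rw [skipIdxA]
              rw [dif_pos ⟨hi, hsw⟩]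
            rw [hskip, hdrop, List.foldl_cons, stepB_mem remove _ true out hmem]
            exact (ih lines (i + 1) out hle').2
      · have hc : ¬ PySem.Set.contains remove (PySem.Str.strip (lines.getD i "")) = true :=
          fun hx => hmem ((PySem.Set.contains_iff _ _).mp hx)
        have hA : loopA lines lines.length remove i out
            = loopA lines lines.length remove (i + 1) (out ++ [lines.getD i ""]) := by
          rw [loopA]; rw [dif_pos hi, if_neg hc]
        constructor
        · rw [hA, hdrop, List.foldl_cons, stepB_false remove _ out hmem]
          exact (ih lines (i + 1) (out ++ [lines.getD i ""]) hle').1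
        · by_cases hsw : PySem.Str.startswith (lines.getD i "") "/" = true
          · have hskip : skipIdxA lines lines.length i = i := by
              rw [skipIdxA]; rw [dif_neg (fun h => h.2 hsw)]
            rw [hskip, hA, hdrop, List.foldl_cons, stepB_true_start remove _ out hmem hsw]
            exact (ih lines (i + 1) (out ++ [lines.getD i ""]) hle').1
          · have hskip : skipIdxA lines lines.length i = skipIdxA lines lines.length (i + 1) := by
              conv_lhs => rw [skipIdxA]
              rw [dif_pos ⟨hi, hsw⟩]
            rw [hskip, hdrop, List.foldl_cons, stepB_true_nostart remove _ out hsw]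
            exact (ih lines (i + 1) out hle').2
    · have hge : lines.length ≤ i := by omega
      have hdrop : lines.drop i = [] := List.drop_eq_nil_of_le hge
      have hskip : skipIdxA lines lines.length i = i := by
        rw [skipIdxA]; rw [dif_neg (by omega)]
      constructor
      · rw [loopA]; rw [dif_neg (by omega)]; rw [hdrop]; rfl
      · rw [hskip, loopA]; rw [dif_neg (by omega)]; rw [hdrop]; rfl

-- ===== VERDICT (by name: the statement is the Claim_ definition above) =====
theorem strip_named_sections_py_spec : Claim_equal_strip_named_sections_py := by
  intro config section_headers _
  unfold Spec_strip_named_sections_py strip_named_sections_py strip_named_sections_py_alt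
  have h := (main_inv (PySem.Set.ofList (section_headers.map PySem.Str.strip))
      (PySem.Str.splitlines config).length (PySem.Str.splitlines config) 0 [] (by omega)).1
  simp only [List.drop_zero] at h
  simp only [h]
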